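-- pv_equiv track=rewrite | github.com/Et3rnalph0en1x/CScode | lab12.py | finalGrades
-- ===== SOURCE A (Python) =====
-- def finalGrades(studentsDict,gradesList):
--
--     keys = list(studentsDict.keys())
--
--     finalDict = {}
--
--     for i in range(len(keys)):
--
--         count = 0
--
--         total = 0
--
--         for j in range(len(gradesList)):
--
--             if gradesList[j][1] == keys[i]:
--
--                 count = count + 1
--
--                 total = total + gradesList[j][2]
--
--         temp = [count, total]
--
--         student = studentsDict[keys[i]]
--
--         finalDict[student] = temp
--
--     return(finalDict)
-- ===== SOURCE B (Python) =====
-- def finalGrades(studentsDict, gradesList):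
--     # one pass over gradesList, aggregating [count, total] per student id;
--     # with no students there is nothing to count, so skip the scan entirely
--     agg = {k: [0, 0] for k in studentsDict}
--     if studentsDict:
--         for row in gradesList:
--             entry = agg.get(row[1])
--             if entry is not None:
--                 entry[0] += 1
--                 entry[1] += row[2]
--     return {name: agg[k] for k, name in studentsDict.items()}
-- ===== Notes on version B (the rewrite author's own statement) =====
-- stated objective: faster
-- what changed: A rescans the whole gradesList once per student (nested loops); B makes a single pass over gradesList, aggregating [count, total] into a dict keyed by student id (skipped entirely when there are no students), then emits the per-name result from the students dict.
import Mathlib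
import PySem

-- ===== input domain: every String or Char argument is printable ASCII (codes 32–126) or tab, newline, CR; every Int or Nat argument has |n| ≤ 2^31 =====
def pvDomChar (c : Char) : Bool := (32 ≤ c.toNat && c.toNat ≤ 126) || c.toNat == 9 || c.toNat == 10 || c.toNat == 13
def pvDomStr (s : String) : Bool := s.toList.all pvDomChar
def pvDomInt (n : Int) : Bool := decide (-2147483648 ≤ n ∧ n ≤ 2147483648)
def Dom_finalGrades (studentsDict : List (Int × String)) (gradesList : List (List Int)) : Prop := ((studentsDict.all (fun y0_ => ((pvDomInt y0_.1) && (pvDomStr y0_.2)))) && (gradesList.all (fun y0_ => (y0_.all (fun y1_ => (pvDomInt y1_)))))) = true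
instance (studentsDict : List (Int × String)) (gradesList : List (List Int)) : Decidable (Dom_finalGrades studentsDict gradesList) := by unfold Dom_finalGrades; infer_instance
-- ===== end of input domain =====

-- B replaces A's per-student rescans of gradesList by one aggregating pass over gradesList
-- into a dict keyed by student id (skipped when there are no students); objective: faster.

-- ===== PORT A =====
-- A's inner-loop body: 'if gradesList[j][1] == key: count += 1; total += gradesList[j][2]'
-- (row indexing via pyGetD is exact under Pre_finalGrades, which rules out the IndexError cases)
def istepA (key : Int) (ct : Int × Int) (row : List Int) : Int × Int :=
  if PySem.List.pyGetD row 1 0 == key then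
    (ct.1 + 1, ct.2 + PySem.List.pyGetD row 2 0)
  else ct

def finalGrades (studentsDict : List (Int × String)) (gradesList : List (List Int)) : List (String × List Int) :=
  let d : PySem.Dict Int String := PySem.Dict.ofList studentsDict
  let keys := d.keys
  (((PySem.List.pyRange 0 (PySem.List.len keys)).foldl (fun finalDict i =>
      let ct : Int × Int :=
        (PySem.List.pyRange 0 (PySem.List.len gradesList)).foldl
          (fun ct j => istepA (PySem.List.pyGetD keys i 0) ct (PySem.List.pyGetD gradesList j [])) (0, 0)
      let temp := [ct.1, ct.2]
      let student := d.getD (PySem.List.pyGetD keys i 0) ""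
      finalDict.insert student temp)
    (PySem.Dict.empty : PySem.Dict String (List Int)))).items

-- ===== PORT B =====
-- B's loop body: 'entry = agg.get(row[1]); if entry is not None: entry[0] += 1; entry[1] += row[2]'
def stepB (a : PySem.Dict Int (List Int)) (row : List Int) : PySem.Dict Int (List Int) :=
  match a.get? (PySem.List.pyGetD row 1 0) with
  | some entry =>
      a.insert (PySem.List.pyGetD row 1 0)
        [PySem.List.pyGetD entry 0 0 + 1,
         PySem.List.pyGetD entry 1 0 + PySem.List.pyGetD row 2 0]
  | none => a

def finalGrades_alt (studentsDict : List (Int × String)) (gradesList : List (List Int)) : List (String × List Int) :=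
  let sd : PySem.Dict Int String := PySem.Dict.ofList studentsDict
  let agg0 : PySem.Dict Int (List Int) :=
    sd.keys.foldl (fun a k => a.insert k [0, 0]) PySem.Dict.empty
  -- 'if studentsDict:' — with no students there is nothing to count, skip the pass
  let agg := if studentsDict.isEmpty then agg0 else gradesList.foldl stepB agg0
  ((sd.items.foldl (fun fd kn => fd.insert kn.2 (agg.getD kn.1 []))
    (PySem.Dict.empty : PySem.Dict String (List Int)))).items

-- ===== PRECONDITION & SPEC =====
-- Pre_ excludes exactly the inputs on which A raises IndexError: a non-empty studentsDict
-- together with a grade row shorter than 2 (A's row[1]) or a row matching some student id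
-- but shorter than 3 (A's row[2]); with an empty studentsDict A never indexes a row.
def Pre_finalGrades (studentsDict : List (Int × String)) (gradesList : List (List Int)) : Prop :=
  studentsDict = [] ∨
    ∀ row ∈ gradesList, 2 ≤ row.length ∧
      (row.getD 1 0 ∈ studentsDict.map Prod.fst → 3 ≤ row.length)
instance (studentsDict : List (Int × String)) (gradesList : List (List Int)) : Decidable (Pre_finalGrades studentsDict gradesList) := by unfold Pre_finalGrades; infer_instance

def pvWitness_finalGrades : (List (Int × String)) × List (List Int) :=
  ([(1, "ann"), (2, "bob")], [[0, 1, 5], [0, 2, 7], [0, 1, -3], [0, 9, 4]])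

def Spec_finalGrades (studentsDict : List (Int × String)) (gradesList : List (List Int)) (out : List (String × List Int)) : Prop := out = finalGrades_alt studentsDict gradesList
instance (studentsDict : List (Int × String)) (gradesList : List (List Int)) (out : List (String × List Int)) : Decidable (Spec_finalGrades studentsDict gradesList out) := by unfold Spec_finalGrades; infer_instance

-- ===== CLAIM (what is proved, stated in full; the proofs are below) =====
def Claim_equal_finalGrades : Prop := ∀ (studentsDict : List (Int × String)) (gradesList : List (List Int)), Dom_finalGrades studentsDict gradesList → Pre_finalGrades studentsDict gradesList → Spec_finalGrades studentsDict gradesList (finalGrades studentsDict gradesList)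

-- ===== LEMMAS AND PROOFS =====

-- the initial dict {k: [0,0] for k in keys}
lemma get?_foldl_insert_zeros (l : List Int) (a : PySem.Dict Int (List Int)) (k : Int) :
    (l.foldl (fun a k => a.insert k [0, 0]) a).get? k
      = if k ∈ l then some [0, 0] else a.get? k := by
  induction l generalizing a with
  | nil => simp
  | cons x l ih =>
    simp only [List.foldl_cons, ih, PySem.Dict.get?_insert, List.mem_cons]
    by_cases h1 : k ∈ l <;> by_cases h2 : k = x <;> simp [h1, h2]

-- B's aggregation pass, read back at a key that is present from the start:
-- it accumulates exactly A's inner-loop pair for that key.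
lemma get?_foldl_stepB (k : Int) (gl : List (List Int)) :
    ∀ (a : PySem.Dict Int (List Int)) (x y : Int), a.get? k = some [x, y] →
      (gl.foldl stepB a).get? k
        = some [(gl.foldl (istepA k) (x, y)).1, (gl.foldl (istepA k) (x, y)).2] := by
  induction gl with
  | nil => intro a x y h; simpa using h
  | cons row gl ih =>
    intro a x y h
    simp only [List.foldl_cons]
    by_cases hsk : PySem.List.pyGetD row 1 0 = k
    · have hstep : stepB a row = a.insert k [x + 1, y + PySem.List.pyGetD row 2 0] := by
        simp only [stepB, hsk, h]
        simp [pysem]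
      have histep : istepA k (x, y) row = (x + 1, y + PySem.List.pyGetD row 2 0) := by
        simp [istepA, hsk]
      rw [hstep, histep]
      exact ih _ _ _ (PySem.Dict.get?_insert_self _ _ _)
    · have histep : istepA k (x, y) row = (x, y) := by
        simp [istepA, hsk]
      rw [histep]
      rcases h2 : a.get? (PySem.List.pyGetD row 1 0) with _ | e
      · have : stepB a row = a := by simp [stepB, h2]
        rw [this]; exact ih _ _ _ h
      · have : stepB a row
            = a.insert (PySem.List.pyGetD row 1 0)
                [PySem.List.pyGetD e 0 0 + 1,
                 PySem.List.pyGetD e 1 0 + PySem.List.pyGetD row 2 0] := by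
          simp [stepB, h2]
        rw [this]
        refine ih _ _ _ ?_
        rw [PySem.Dict.get?_insert_of_ne _ _ (fun hk => hsk hk.symm)]
        exact h

-- A's inner pyRange loop over gradesList is the fold of istepA over gradesList itself
lemma innerA_eq (key : Int) (gl : List (List Int)) (init : Int × Int) :
    (PySem.List.pyRange 0 (PySem.List.len gl)).foldl
        (fun ct j => istepA key ct (PySem.List.pyGetD gl j [])) init
      = gl.foldl (istepA key) init := by
  simpa using PySem.List.foldl_pyRange_pyGetD gl [] (istepA key) init (le_refl 0)

theorem finalGrades_eq_alt (studentsDict : List (Int × String)) (gradesList : List (List Int)) :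
    finalGrades studentsDict gradesList = finalGrades_alt studentsDict gradesList := by
  by_cases hsd : studentsDict = []
  · subst hsd; rfl
  unfold finalGrades finalGrades_alt
  dsimp only
  rw [if_neg (by simpa using hsd)]
  set d : PySem.Dict Int String := PySem.Dict.ofList studentsDict with hd
  set agg0 : PySem.Dict Int (List Int) :=
    d.keys.foldl (fun a k => a.insert k [0, 0]) PySem.Dict.empty with hagg0
  set agg := gradesList.foldl stepB agg0 with hagg
  -- A's outer pyRange loop over keys is a fold over d.keys
  rw [show (PySem.List.pyRange 0 (PySem.List.len d.keys)).foldl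
        (fun finalDict i =>
          finalDict.insert
            (d.getD (PySem.List.pyGetD d.keys i 0) "")
            [((PySem.List.pyRange 0 (PySem.List.len gradesList)).foldl
                (fun ct j => istepA (PySem.List.pyGetD d.keys i 0) ct
                  (PySem.List.pyGetD gradesList j [])) (0, 0)).1,
             ((PySem.List.pyRange 0 (PySem.List.len gradesList)).foldl
                (fun ct j => istepA (PySem.List.pyGetD d.keys i 0) ct
                  (PySem.List.pyGetD gradesList j [])) (0, 0)).2])
        (PySem.Dict.empty : PySem.Dict String (List Int))
      = d.keys.foldl
          (fun finalDict key =>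
            finalDict.insert (d.getD key "")
              [(gradesList.foldl (istepA key) (0, 0)).1,
               (gradesList.foldl (istepA key) (0, 0)).2])
          PySem.Dict.empty from by
    simp only [innerA_eq]
    simpa using PySem.List.foldl_pyRange_pyGetD d.keys 0
      (fun finalDict key =>
        finalDict.insert (d.getD key "")
          [(gradesList.foldl (istepA key) (0, 0)).1,
           (gradesList.foldl (istepA key) (0, 0)).2])
      PySem.Dict.empty (le_refl 0)]
  -- d.keys is d.items.map Prod.fst, so both sides are folds over d.items
  have hkeys : d.keys = d.items.map Prod.fst := rfl
  rw [hkeys, List.foldl_map]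
  congr 1
  refine PySem.List.foldl_congr_mem d.items _ _ PySem.Dict.empty ?_
  intro fd kn hkn
  have hmemk : kn.1 ∈ d.keys := PySem.Dict.mem_keys_of_mem_items d hkn
  have hname : d.getD kn.1 "" = kn.2 := by
    rcases kn with ⟨k, v⟩
    exact PySem.Dict.getD_of_mem_items d hkn (PySem.Dict.nodup_keys_ofList studentsDict) ""
  have hagg0k : agg0.get? kn.1 = some [0, 0] := by
    rw [hagg0, get?_foldl_insert_zeros]
    simp [hmemk]
  have haggk : agg.getD kn.1 []
      = [(gradesList.foldl (istepA kn.1) (0, 0)).1,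
         (gradesList.foldl (istepA kn.1) (0, 0)).2] := by
    rw [PySem.Dict.getD_eq_get?_getD, hagg,
      get?_foldl_stepB kn.1 gradesList agg0 0 0 hagg0k]
    rfl
  rw [hname, ← haggk]

-- ===== VERDICT (by name: the statement is the Claim_ definition above) =====
theorem finalGrades_spec : Claim_equal_finalGrades := by
  intro studentsDict gradesList _ _
  unfold Spec_finalGrades
  exact finalGrades_eq_alt studentsDict gradesList
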